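-- pv_equiv track=rewrite | github.com/IvanKalug-QA/codewars | Fold_an_array.py | fold_array
-- ===== SOURCE A (Python) =====
-- def fold_array(array, runs):
--     counter = 0
--     output_array = array[::]
--     while counter < runs:
--         if len(output_array) == 1:
--             return output_array
--         mid = len(output_array) // 2
--         if len(output_array) % 2 == 0:
--             output_array, slice = output_array[:mid], output_array[mid:][::-1]
--         else:
--             output_array, slice = output_array[:mid+1], output_array[mid+1:][::-1]
--         for i in range(len(slice)):
--             output_array[i] += slice[i]
--         counter += 1
--     return output_array
-- ===== SOURCE B (Python) =====
-- def fold_array(array, runs):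
--     # Precompute the sequence of lengths at which a fold actually happens.
--     lengths = []
--     n = len(array)
--     t = 0
--     while t < runs and n > 1:
--         lengths.append(n)
--         n = (n + 1) // 2
--         t += 1
--     # Scatter-accumulate: route each original element through the composed
--     # per-fold index maps to its final slot; no intermediate arrays are built.
--     result = [0] * n
--     for i, v in enumerate(array):
--         p = i
--         for L in lengths:
--             if p >= (L + 1) // 2:
--                 p = L - 1 - p
--         result[p] += v
--     return result
-- ===== Notes on version B (the rewrite author's own statement) =====
-- stated objective: alternative
-- what changed: B never builds any intermediate folded arrays: it precomputes the sequence of lengths at which folds happen, composes the per-fold index maps to route each original element straight to its final slot, and does one scatter-accumulate pass into a zero array, instead of A's repeated slice/reverse/add-in-parallel folding.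
import Mathlib
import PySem

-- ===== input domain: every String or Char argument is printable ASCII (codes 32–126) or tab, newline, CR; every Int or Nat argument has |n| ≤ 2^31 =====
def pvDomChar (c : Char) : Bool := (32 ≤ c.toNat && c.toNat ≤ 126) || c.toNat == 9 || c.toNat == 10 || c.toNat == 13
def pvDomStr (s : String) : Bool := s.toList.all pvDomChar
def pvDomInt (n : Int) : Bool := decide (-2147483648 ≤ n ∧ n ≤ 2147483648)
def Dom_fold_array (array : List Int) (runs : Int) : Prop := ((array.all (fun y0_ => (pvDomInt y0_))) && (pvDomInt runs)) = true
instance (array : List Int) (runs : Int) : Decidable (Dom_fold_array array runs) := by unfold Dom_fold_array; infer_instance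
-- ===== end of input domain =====

-- B replaces A's repeated fold-and-add of array halves by a single scatter pass:
-- it precomputes the per-fold index maps (from the sequence of lengths) and routes
-- each original element directly to its final slot; same return value.

-- ===== PORT A =====
-- A's inner loop 'for i in range(len(slice)): output_array[i] += slice[i]';
-- indices are nonneg and in range, so List.range / set / getD are exact here.
def foldA_add (head slice : List Int) : List Int :=
  (List.range slice.length).foldl (fun acc i => acc.set i (acc.getD i 0 + slice.getD i 0)) head

-- A's while loop: counter increments toward runs; early return when one element remains.
def foldA_loop (output : List Int) (counter runs : Int) : List Int :=
  if h : counter < runs then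
    if output.length = 1 then output
    else
      let mid := output.length / 2
      if output.length % 2 = 0 then
        foldA_loop (foldA_add (output.take mid) ((output.drop mid).reverse)) (counter + 1) runs
      else
        foldA_loop (foldA_add (output.take (mid + 1)) ((output.drop (mid + 1)).reverse)) (counter + 1) runs
  else output
termination_by (runs - counter).toNat
decreasing_by all_goals omega

def fold_array (array : List Int) (runs : Int) : List Int :=
  foldA_loop array 0 runs

-- ===== PORT B =====
-- B's first loop: collect the lengths at which a fold happens; returns (lengths, final n).
def lensB (n : Nat) (t runs : Int) : List Nat × Nat :=
  if h : t < runs ∧ 1 < n then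
    let r := lensB ((n + 1) / 2) (t + 1) runs
    (n :: r.1, r.2)
  else ([], n)
termination_by (runs - t).toNat
decreasing_by omega

-- B's inner loop 'for L in lengths: if p >= (L+1)//2: p = L-1-p' (all values nonneg).
def posB (Ls : List Nat) (p : Nat) : Nat :=
  Ls.foldl (fun p L => if (L + 1) / 2 ≤ p then L - 1 - p else p) p

-- B's scatter pass: 'result = [0]*n; for i, v in enumerate(array): result[pos] += v'.
def fold_array_alt (array : List Int) (runs : Int) : List Int :=
  let lm := lensB array.length 0 runs
  array.zipIdx.foldl
    (fun acc iv =>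
      let p := posB lm.1 iv.2
      acc.set p (acc.getD p 0 + iv.1))
    (List.replicate lm.2 0)

-- ===== PRECONDITION & SPEC =====
def Spec_fold_array (array : List Int) (runs : Int) (out : List Int) : Prop := out = fold_array_alt array runs
instance (array : List Int) (runs : Int) (out : List Int) : Decidable (Spec_fold_array array runs out) := by unfold Spec_fold_array; infer_instance

-- ===== CLAIM (what is proved, stated in full; the proofs are below) =====
def Claim_equal_fold_array : Prop := ∀ (array : List Int) (runs : Int), Dom_fold_array array runs → Spec_fold_array array runs (fold_array array runs)

-- ===== LEMMAS AND PROOFS =====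

-- canonical one-fold step (A's fold written with direct indices), proof-side only
def pstep (cur : List Int) : List Int :=
  (List.range (cur.length / 2)).foldl
    (fun acc i => acc.set i (acc.getD i 0 + cur.getD (cur.length - 1 - i) 0))
    (cur.take ((cur.length + 1) / 2))

def iterLoop (cur : List Int) (r runs : Int) : List Int :=
  if h : r < runs ∧ 1 < cur.length then
    iterLoop (pstep cur) (r + 1) runs
  else cur
termination_by (runs - r).toNat
decreasing_by omega

-- the per-fold functions agree: A's slice is the reversed tail, whose i-th element is cur[n-1-i]
lemma stepA_eq_pstep (cur : List Int) :
    foldA_add (cur.take ((cur.length + 1) / 2)) ((cur.drop ((cur.length + 1) / 2)).reverse)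
      = pstep cur := by
  unfold foldA_add pstep
  have hlen : ((cur.drop ((cur.length + 1) / 2)).reverse).length = cur.length / 2 := by
    simp; omega
  rw [hlen]
  apply PySem.List.foldl_congr_mem
  intro acc i hi
  have hi' : i < cur.length / 2 := List.mem_range.mp hi
  congr 1
  have hlt : i < (cur.drop ((cur.length + 1) / 2)).length := by
    rw [List.length_drop]; omega
  simp [List.getD_eq_getElem?_getD, List.getElem?_reverse hlt, List.getElem?_drop, List.length_drop]
  congr 2
  omega

lemma loopsA_eq (cur : List Int) (c r : Int) : foldA_loop cur c r = iterLoop cur c r := by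
  induction hf : (r - c).toNat generalizing cur c with
  | zero =>
    rw [foldA_loop, iterLoop]
    have : ¬ c < r := by omega
    simp [this]
  | succ fuel ih =>
    have hcr : c < r := by omega
    rw [foldA_loop, iterLoop]
    by_cases h1 : cur.length = 1
    · simp [hcr, h1]
    · rcases Nat.eq_zero_or_pos cur.length with h0 | hpos
      · have hnil : cur = [] := List.length_eq_zero_iff.mp h0
        subst hnil
        rw [dif_pos hcr]
        simp only [List.length_nil, Nat.zero_div, List.take_nil, List.drop_nil,
          List.reverse_nil]
        have hstep : foldA_add ([] : List Int) ([] : List Int) = [] := by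
          simp [foldA_add]
        rw [hstep, ih [] (c + 1) (by omega), iterLoop]
        simp
      · have h2 : 2 ≤ cur.length := by omega
        rw [dif_pos hcr, dif_pos (show c < r ∧ 1 < cur.length from ⟨hcr, by omega⟩),
          if_neg h1]
        by_cases hpar : cur.length % 2 = 0
        · have hmid : cur.length / 2 = (cur.length + 1) / 2 := by omega
          rw [if_pos hpar, hmid, stepA_eq_pstep, ih _ (c + 1) (by omega)]
        · have hmid : cur.length / 2 + 1 = (cur.length + 1) / 2 := by omega
          rw [if_neg hpar, hmid, stepA_eq_pstep, ih _ (c + 1) (by omega)]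

-- === scatter machinery ===
def upd (acc : List Int) (pv : Nat × Int) : List Int :=
  acc.set pv.1 (acc.getD pv.1 0 + pv.2)

def updFold (pairs : List (Nat × Int)) (init : List Int) : List Int :=
  pairs.foldl upd init

def sumAt : List (Nat × Int) → Nat → Int
  | [], _ => 0
  | pv :: rest, p => (if pv.1 = p then pv.2 else 0) + sumAt rest p

lemma updFold_length (pairs : List (Nat × Int)) (init : List Int) :
    (updFold pairs init).length = init.length := by
  induction pairs generalizing init with
  | nil => rfl
  | cons pv rest ih =>
    have := ih (upd init pv)
    simpa [updFold, upd] using this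

lemma upd_getD (init : List Int) (q : Nat) (v : Int) (p : Nat) (hq : q < init.length) :
    (upd init (q, v)).getD p 0 = init.getD p 0 + if q = p then v else 0 := by
  unfold upd
  by_cases h : q = p
  · subst h
    simp [List.getD_eq_getElem?_getD, hq]
  · simp [List.getD_eq_getElem?_getD, h]

lemma updFold_getD (pairs : List (Nat × Int)) (init : List Int) (p : Nat)
    (hb : ∀ pv ∈ pairs, pv.1 < init.length) :
    (updFold pairs init).getD p 0 = init.getD p 0 + sumAt pairs p := by
  induction pairs generalizing init with
  | nil => simp [updFold, sumAt]
  | cons pv rest ih =>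
    have hq : pv.1 < init.length := hb pv (List.mem_cons_self)
    have hb' : ∀ q ∈ rest, q.1 < (upd init pv).length := by
      intro q hqmem
      simpa [upd] using hb q (List.mem_cons_of_mem _ hqmem)
    calc (updFold (pv :: rest) init).getD p 0
        = (upd init pv).getD p 0 + sumAt rest p := ih (upd init pv) hb'
      _ = init.getD p 0 + sumAt (pv :: rest) p := by
          rw [show (upd init pv) = upd init (pv.1, pv.2) from rfl,
            upd_getD init pv.1 pv.2 p hq]
          simp [sumAt]; ring

-- the Finset-sum view of the contributions to slot p
def S (xs : List Int) (Ls : List Nat) (p : Nat) : Int :=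
  ∑ i ∈ Finset.range xs.length, (if posB Ls i = p then xs.getD i 0 else 0)

lemma sumAt_zipIdx (xs : List Int) (Ls : List Nat) (k p : Nat) :
    sumAt ((xs.zipIdx k).map (fun iv => (posB Ls iv.2, iv.1))) p
      = ∑ i ∈ Finset.range xs.length, (if posB Ls (k + i) = p then xs.getD i 0 else 0) := by
  induction xs generalizing k with
  | nil => simp [sumAt]
  | cons x rest ih =>
    simp only [List.zipIdx_cons, List.map_cons, sumAt, List.length_cons]
    rw [Finset.sum_range_succ']
    simp only [List.getD_cons_succ, List.getD_cons_zero, Nat.add_zero]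
    rw [ih (k + 1)]
    have hcong : ∀ i ∈ Finset.range rest.length,
        (if posB Ls (k + (i + 1)) = p then rest.getD i 0 else 0)
          = (if posB Ls ((k + 1) + i) = p then rest.getD i 0 else 0) := by
      intro i _
      have : k + (i + 1) = (k + 1) + i := by omega
      rw [this]
    rw [Finset.sum_congr rfl hcong]
    ring

-- pstep as a scatter
lemma pstep_eq_updFold (cur : List Int) :
    pstep cur = updFold ((List.range (cur.length / 2)).map
        (fun i => (i, cur.getD (cur.length - 1 - i) 0)))
      (cur.take ((cur.length + 1) / 2)) := by
  unfold pstep updFold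
  rw [List.foldl_map]
  rfl

lemma sumAt_append (ps qs : List (Nat × Int)) (p : Nat) :
    sumAt (ps ++ qs) p = sumAt ps p + sumAt qs p := by
  induction ps with
  | nil => simp [sumAt]
  | cons pv rest ih => simp [sumAt, ih]; ring

lemma sumAt_range_map (k : Nat) (c : Nat → Int) (p : Nat) :
    sumAt ((List.range k).map (fun i => (i, c i))) p = if p < k then c p else 0 := by
  induction k with
  | zero => simp [sumAt]
  | succ k ih =>
    rw [List.range_succ, List.map_append, sumAt_append, ih]
    by_cases h : p < k
    · have hne : ¬ k = p := by omega
      have hlt : p < k + 1 := Nat.lt_succ_of_lt h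
      simp [sumAt, h, hlt, hne]
    · by_cases h2 : p = k
      · subst h2
        simp [sumAt]
      · have hlt : ¬ p < k + 1 := by omega
        have : ¬ k = p := fun hh => h2 hh.symm
        simp [sumAt, h, hlt, this]

lemma pstep_length (cur : List Int) :
    (pstep cur).length = (cur.length + 1) / 2 := by
  rw [pstep_eq_updFold, updFold_length, List.length_take]
  omega

lemma pstep_getD (cur : List Int) (j : Nat) (hj : j < (cur.length + 1) / 2) :
    (pstep cur).getD j 0
      = cur.getD j 0 + (if j < cur.length / 2 then cur.getD (cur.length - 1 - j) 0 else 0) := by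
  rw [pstep_eq_updFold]
  rw [updFold_getD]
  · rw [sumAt_range_map]
    congr 1
    have : (cur.take ((cur.length + 1) / 2)).getD j 0 = cur.getD j 0 := by
      simp [List.getD_eq_getElem?_getD, hj]
    rw [this]
  · intro pv hpv
    rw [List.mem_map] at hpv
    obtain ⟨i, hi, rfl⟩ := hpv
    have := List.mem_range.mp hi
    rw [List.length_take]
    omega

-- one fold commutes with the scatter sums
lemma S_step (cur : List Int) (Ls : List Nat) (p : Nat) (h2 : 1 < cur.length) :
    S cur (cur.length :: Ls) p = S (pstep cur) Ls p := by
  have hpos1 : ∀ i, posB (cur.length :: Ls) i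
      = posB Ls (if (cur.length + 1) / 2 ≤ i then cur.length - 1 - i else i) := by
    intro i; simp [posB]
  unfold S
  rw [pstep_length]
  have hR : ∑ j ∈ Finset.range ((cur.length + 1) / 2),
        (if posB Ls j = p then (pstep cur).getD j 0 else 0)
      = (∑ j ∈ Finset.range ((cur.length + 1) / 2), (if posB Ls j = p then cur.getD j 0 else 0))
        + ∑ j ∈ Finset.range (cur.length / 2),
            (if posB Ls j = p then cur.getD (cur.length - 1 - j) 0 else 0) := by
    have hterm : ∀ j ∈ Finset.range ((cur.length + 1) / 2),
        (if posB Ls j = p then (pstep cur).getD j 0 else 0)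
          = (if posB Ls j = p then cur.getD j 0 else 0)
            + (if j < cur.length / 2
                then (if posB Ls j = p then cur.getD (cur.length - 1 - j) 0 else 0) else 0) := by
      intro j hj
      rw [pstep_getD cur j (List.mem_range.mp hj)]
      by_cases hc : posB Ls j = p <;> by_cases hd : j < cur.length / 2 <;> simp [hc, hd]
    rw [Finset.sum_congr rfl hterm, Finset.sum_add_distrib]
    congr 1
    -- drop the possible middle term (j = cur.length/2) whose ite is 0
    by_cases hpar : cur.length % 2 = 0
    · have heq : (cur.length + 1) / 2 = cur.length / 2 := by omega
      rw [heq]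
      apply Finset.sum_congr rfl
      intro j hj
      simp [List.mem_range.mp hj]
    · have heq : (cur.length + 1) / 2 = cur.length / 2 + 1 := by omega
      rw [heq, Finset.sum_range_succ]
      simp only [lt_self_iff_false, if_false, add_zero]
      apply Finset.sum_congr rfl
      intro j hj
      simp [List.mem_range.mp hj]
  rw [hR]
  -- split the LHS at (cur.length+1)/2 and reflect the tail
  have hsplit : cur.length = (cur.length + 1) / 2 + cur.length / 2 := by omega
  conv_lhs =>
    rw [show Finset.range cur.length
          = Finset.range ((cur.length + 1) / 2 + cur.length / 2) by rw [← hsplit]]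
  rw [Finset.sum_range_add]
  congr 1
  · apply Finset.sum_congr rfl
    intro i hi
    have hi' := List.mem_range.mp hi
    rw [hpos1]
    have hnle : ¬ (cur.length + 1) / 2 ≤ i := by omega
    simp [hnle]
  · conv_rhs => rw [← Finset.sum_range_reflect]
    apply Finset.sum_congr rfl
    intro i hi
    have hi' : i < cur.length / 2 := List.mem_range.mp hi
    rw [hpos1]
    have h1 : (cur.length + 1) / 2 ≤ (cur.length + 1) / 2 + i := by omega
    have e1 : (if (cur.length + 1) / 2 ≤ (cur.length + 1) / 2 + i
          then cur.length - 1 - ((cur.length + 1) / 2 + i) else (cur.length + 1) / 2 + i)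
        = cur.length / 2 - 1 - i := by
      rw [if_pos h1]; omega
    have h3 : cur.length - 1 - (cur.length / 2 - 1 - i) = (cur.length + 1) / 2 + i := by omega
    rw [e1, h3]

-- positions stay in range along the chain
lemma posB_lt (n : Nat) (t runs : Int) (i : Nat) (hi : i < n) :
    posB (lensB n t runs).1 i < (lensB n t runs).2 := by
  induction hf : (runs - t).toNat generalizing n t i with
  | zero =>
    rw [lensB]
    have : ¬ t < runs := by omega
    simp [this, posB, hi]
  | succ fuel ih =>
    rw [lensB]
    by_cases h : t < runs ∧ 1 < n
    · rw [dif_pos h]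
      have hstep : (if (n + 1) / 2 ≤ i then n - 1 - i else i) < (n + 1) / 2 := by
        split_ifs <;> omega
      have := ih ((n + 1) / 2) (t + 1) _ hstep (by omega)
      simpa [posB] using this
    · rw [dif_neg h]
      simpa [posB] using hi

lemma list_ext_getD (xs ys : List Int) (hl : xs.length = ys.length)
    (h : ∀ p, p < xs.length → xs.getD p 0 = ys.getD p 0) : xs = ys := by
  apply List.ext_getElem hl
  intro i h1 h2
  have := h i h1
  simpa [List.getD_eq_getElem?_getD, List.getElem?_eq_getElem, h1, h2] using this

-- the scatter over the whole length chain equals the iterated fold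
lemma bridge (cur : List Int) (t runs : Int) :
    updFold ((cur.zipIdx).map (fun iv => (posB (lensB cur.length t runs).1 iv.2, iv.1)))
        (List.replicate (lensB cur.length t runs).2 0)
      = iterLoop cur t runs := by
  induction hf : (runs - t).toNat generalizing cur t with
  | zero =>
    have hnr : ¬ (t < runs) := by omega
    rw [iterLoop, lensB]
    simp only [hnr, false_and, dif_neg, not_false_iff]
    apply list_ext_getD
    · rw [updFold_length]; simp
    · intro p hp
      rw [updFold_length, List.length_replicate] at hp
      rw [updFold_getD _ _ _ (by
        intro pv hpv
        rw [List.mem_map] at hpv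
        obtain ⟨iv, hiv, rfl⟩ := hpv
        have : iv.2 < cur.length := by
          obtain ⟨k, hk, h2⟩ := List.mem_iff_getElem.mp hiv
          rw [List.getElem_zipIdx] at h2
          have hklen : k < cur.length := by simpa using hk
          simp [← h2]; omega
        rw [List.length_replicate]
        simpa [posB] using this)]
      rw [show (cur.zipIdx).map (fun iv => (posB ([] : List Nat) iv.2, iv.1))
            = (cur.zipIdx 0).map (fun iv => (posB ([] : List Nat) iv.2, iv.1)) from rfl,
        sumAt_zipIdx]
      simp only [posB, List.foldl_nil, Nat.zero_add]
      rw [Finset.sum_ite_eq' (Finset.range cur.length) p (fun i => cur.getD i 0)]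
      simp [Finset.mem_range, hp]
  | succ fuel ih =>
    by_cases h : t < runs ∧ 1 < cur.length
    · rw [iterLoop, dif_pos h]
      have hlen : (pstep cur).length = (cur.length + 1) / 2 := pstep_length cur
      have hIH := ih (pstep cur) (t + 1) (by omega)
      rw [hlen] at hIH
      rw [← hIH]
      -- lensB unfolds one step
      rw [show lensB cur.length t runs
            = (cur.length :: (lensB ((cur.length + 1) / 2) (t + 1) runs).1,
               (lensB ((cur.length + 1) / 2) (t + 1) runs).2) by rw [lensB, dif_pos h]]
      set Ls := (lensB ((cur.length + 1) / 2) (t + 1) runs).1 with hLs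
      set m := (lensB ((cur.length + 1) / 2) (t + 1) runs).2 with hm
      -- both sides are scatters into replicate m 0; compare pointwise
      have hposb : ∀ i, i < cur.length → posB (cur.length :: Ls) i < m := by
        intro i hi
        have := posB_lt cur.length t runs i hi
        rw [lensB, dif_pos h] at this
        exact this
      have hposb2 : ∀ j, j < (cur.length + 1) / 2 → posB Ls j < m := by
        intro j hj
        have := posB_lt ((cur.length + 1) / 2) (t + 1) runs j hj
        rw [← hLs, ← hm] at this
        exact this
      apply list_ext_getD
      · rw [updFold_length, updFold_length]
      · intro p hp
        rw [updFold_length, List.length_replicate] at hp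
        rw [updFold_getD _ _ _ (by
            intro pv hpv
            rw [List.mem_map] at hpv
            obtain ⟨iv, hiv, rfl⟩ := hpv
            have hivlt : iv.2 < cur.length := by
              obtain ⟨k, hk, h2⟩ := List.mem_iff_getElem.mp hiv
              rw [List.getElem_zipIdx] at h2
              have hklen : k < cur.length := by simpa using hk
              simp [← h2]; omega
            rw [List.length_replicate]
            exact hposb _ hivlt),
          updFold_getD _ _ _ (by
            intro pv hpv
            rw [List.mem_map] at hpv
            obtain ⟨iv, hiv, rfl⟩ := hpv
            have hivlt : iv.2 < (pstep cur).length := by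
              obtain ⟨k, hk, h2⟩ := List.mem_iff_getElem.mp hiv
              rw [List.getElem_zipIdx] at h2
              have hklen : k < (pstep cur).length := by simpa using hk
              simp [← h2]; omega
            rw [List.length_replicate]
            exact hposb2 _ (hlen ▸ hivlt))]
        congr 1
        rw [show (cur.zipIdx).map (fun iv => (posB (cur.length :: Ls) iv.2, iv.1))
              = (cur.zipIdx 0).map (fun iv => (posB (cur.length :: Ls) iv.2, iv.1)) from rfl,
          show ((pstep cur).zipIdx).map (fun iv => (posB Ls iv.2, iv.1))
              = ((pstep cur).zipIdx 0).map (fun iv => (posB Ls iv.2, iv.1)) from rfl,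
          sumAt_zipIdx, sumAt_zipIdx]
        simp only [Nat.zero_add]
        have hS := S_step cur Ls p h.2
        unfold S at hS
        rw [hlen] at hS
        rw [hlen]
        exact hS
    · rw [iterLoop, dif_neg h, lensB, dif_neg h]
      apply list_ext_getD
      · rw [updFold_length]; simp
      · intro p hp
        rw [updFold_length, List.length_replicate] at hp
        rw [updFold_getD _ _ _ (by
          intro pv hpv
          rw [List.mem_map] at hpv
          obtain ⟨iv, hiv, rfl⟩ := hpv
          have : iv.2 < cur.length := by
            obtain ⟨k, hk, h2⟩ := List.mem_iff_getElem.mp hiv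
            rw [List.getElem_zipIdx] at h2
            have hklen : k < cur.length := by simpa using hk
            simp [← h2]; omega
          rw [List.length_replicate]
          simpa [posB] using this)]
        rw [show (cur.zipIdx).map (fun iv => (posB ([] : List Nat) iv.2, iv.1))
              = (cur.zipIdx 0).map (fun iv => (posB ([] : List Nat) iv.2, iv.1)) from rfl,
          sumAt_zipIdx]
        simp only [posB, List.foldl_nil, Nat.zero_add]
        rw [Finset.sum_ite_eq' (Finset.range cur.length) p (fun i => cur.getD i 0)]
        simp [Finset.mem_range, hp]

lemma alt_eq_iter (array : List Int) (runs : Int) :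
    fold_array_alt array runs = iterLoop array 0 runs := by
  rw [← bridge array 0 runs]
  unfold fold_array_alt updFold
  rw [List.foldl_map]
  rfl

-- ===== VERDICT (by name: the statement is the Claim_ definition above) =====
theorem fold_array_spec : Claim_equal_fold_array := by
  intro array runs _
  unfold Spec_fold_array fold_array
  rw [loopsA_eq, alt_eq_iter]
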